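-- pv_equiv track=rewrite | github.com/Jirsch/iAI | multi_agent/multiAgents.py | get_minimax_action
-- ===== SOURCE A (Python) =====
-- def get_minimax_action(agent, action_scores):
--     if agent == 0:
--         best_score = max(score[1] for score in action_scores)
--     else:
--         best_score = min(score[1] for score in action_scores)
--     best_actions = [action_score for action_score in action_scores if
--                     action_score[1] == best_score]
--     return best_actions[0]
-- ===== SOURCE B (Python) =====
-- def get_minimax_action(agent, action_scores):
--     ranked = sorted(action_scores, key=lambda s: s[1], reverse=(agent == 0))
--     return ranked[0]
-- ===== Notes on version B (the rewrite author's own statement) =====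
-- stated objective: alternative
-- what changed: Replaces A's extreme-score-then-filter-then-index scheme by a stable sort on the score (descending for agent 0, ascending otherwise) and taking the first element of the sorted list; Python's stable sort keeps ties in input order, so the head is exactly A's first best action.
import Mathlib
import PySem

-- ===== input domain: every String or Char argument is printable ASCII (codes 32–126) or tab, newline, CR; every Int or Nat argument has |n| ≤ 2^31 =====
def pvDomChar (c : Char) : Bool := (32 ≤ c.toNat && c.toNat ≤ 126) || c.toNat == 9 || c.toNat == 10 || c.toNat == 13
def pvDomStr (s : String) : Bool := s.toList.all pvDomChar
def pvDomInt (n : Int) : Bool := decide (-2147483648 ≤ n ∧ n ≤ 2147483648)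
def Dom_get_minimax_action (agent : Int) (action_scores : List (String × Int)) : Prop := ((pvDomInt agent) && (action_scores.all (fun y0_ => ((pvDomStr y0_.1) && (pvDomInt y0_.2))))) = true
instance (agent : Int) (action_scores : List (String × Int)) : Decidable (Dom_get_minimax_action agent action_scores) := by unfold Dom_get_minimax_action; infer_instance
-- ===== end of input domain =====

-- B replaces A's two passes (extreme score, then filter-and-index-0) by a stable sort on the
-- score (descending for agent 0, ascending otherwise) followed by taking the head (objective:
-- alternative — different algorithm, not faster: O(n log n) sort vs A's O(n) passes).
-- Pre_ excludes only the empty list, on which Python raises ValueError in A and IndexError in B.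


-- ===== PORT A =====
def get_minimax_action (agent : Int) (action_scores : List (String × Int)) : String × Int :=
  let best_score? :=
    if agent = 0 then PySem.List.max? (action_scores.map (fun score => score.2)) (fun x => x)
    else PySem.List.min? (action_scores.map (fun score => score.2)) (fun x => x)
  match best_score? with
  | none => ("", 0)  -- Python raises ValueError here (empty sequence); excluded by Pre_
  | some best_score =>
    let best_actions := action_scores.filter (fun action_score => action_score.2 == best_score)
    match PySem.List.pyGet? best_actions 0 with
    | none => ("", 0)  -- unreachable on Pre_
    | some r => r

-- ===== PORT B =====
def get_minimax_action_alt (agent : Int) (action_scores : List (String × Int)) : String × Int :=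
  let ranked := PySem.List.sorted action_scores (fun s => s.2) (decide (agent = 0))
  (PySem.List.pyGet? ranked 0).getD ("", 0)  -- ranked[0]; none only off Pre_ (Python raises IndexError there)

-- ===== PRECONDITION & SPEC =====
-- Pre_ excludes exactly the empty list: there A's max()/min() raises ValueError and B's [0] raises IndexError.
def Pre_get_minimax_action (agent : Int) (action_scores : List (String × Int)) : Prop := action_scores ≠ []
instance (agent : Int) (action_scores : List (String × Int)) : Decidable (Pre_get_minimax_action agent action_scores) := by unfold Pre_get_minimax_action; infer_instance
def pvWitness_get_minimax_action : Int × (List (String × Int)) := (0, [("Stop", 3), ("North", 3)])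

def Spec_get_minimax_action (agent : Int) (action_scores : List (String × Int)) (out : String × Int) : Prop := out = get_minimax_action_alt agent action_scores
instance (agent : Int) (action_scores : List (String × Int)) (out : String × Int) : Decidable (Spec_get_minimax_action agent action_scores out) := by unfold Spec_get_minimax_action; infer_instance

-- ===== CLAIM (what is proved, stated in full; the proofs are below) =====
def Claim_equal_get_minimax_action : Prop := ∀ (agent : Int) (action_scores : List (String × Int)), Dom_get_minimax_action agent action_scores → Pre_get_minimax_action agent action_scores → Spec_get_minimax_action agent action_scores (get_minimax_action agent action_scores)

-- ===== LEMMAS AND PROOFS =====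

-- generic "running best" fold; better x m = "x strictly beats the current best m"
def pvFm (better : Int → Int → Prop) [DecidableRel better] (a : String × Int) (xs : List (String × Int)) : String × Int :=
  List.foldl (fun m x => if better x.2 m.2 then x else m) a xs

-- A's extreme score over the mapped scores is the score of the running best
theorem pv_max?_map_cons (xs : List (String × Int)) (a : String × Int) :
    PySem.List.max? ((a :: xs).map (fun s => s.2)) (fun x => x)
    = some ((pvFm (fun v w => w < v) a xs).2) := by
  induction xs generalizing a with
  | nil => simp [PySem.List.max?, pvFm]
  | cons x t ih =>
    by_cases hc : a.2 < x.2
    · have h1 : PySem.List.max? ((a :: x :: t).map (fun s => s.2)) (fun x => x)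
          = PySem.List.max? ((x :: t).map (fun s => s.2)) (fun x => x) := by
        simp [PySem.List.max?, List.foldl_cons, hc]
      rw [h1, ih x]; simp [pvFm, List.foldl_cons, hc]
    · have h1 : PySem.List.max? ((a :: x :: t).map (fun s => s.2)) (fun x => x)
          = PySem.List.max? ((a :: t).map (fun s => s.2)) (fun x => x) := by
        simp [PySem.List.max?, List.foldl_cons, hc]
      rw [h1, ih a]; simp [pvFm, List.foldl_cons, hc]

theorem pv_min?_map_cons (xs : List (String × Int)) (a : String × Int) :
    PySem.List.min? ((a :: xs).map (fun s => s.2)) (fun x => x)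
    = some ((pvFm (fun v w => v < w) a xs).2) := by
  induction xs generalizing a with
  | nil => simp [PySem.List.min?, pvFm]
  | cons x t ih =>
    by_cases hc : x.2 < a.2
    · have h1 : PySem.List.min? ((a :: x :: t).map (fun s => s.2)) (fun x => x)
          = PySem.List.min? ((x :: t).map (fun s => s.2)) (fun x => x) := by
        simp [PySem.List.min?, List.foldl_cons, hc]
      rw [h1, ih x]; simp [pvFm, List.foldl_cons, hc]
    · have h1 : PySem.List.min? ((a :: x :: t).map (fun s => s.2)) (fun x => x)
          = PySem.List.min? ((a :: t).map (fun s => s.2)) (fun x => x) := by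
        simp [PySem.List.min?, List.foldl_cons, hc]
      rw [h1, ih a]; simp [pvFm, List.foldl_cons, hc]

-- the running best either stays the seed or strictly beats it
theorem pv_fm_dichot (better : Int → Int → Prop) [DecidableRel better]
    (htrans : ∀ u v w : Int, better v w → better u v → better u w)
    (xs : List (String × Int)) (a : String × Int) :
    pvFm better a xs = a ∨ better (pvFm better a xs).2 a.2 := by
  induction xs generalizing a with
  | nil => left; rfl
  | cons x t ih =>
    by_cases h : better x.2 a.2
    · have hfm : pvFm better a (x :: t) = pvFm better x t := by
        simp [pvFm, List.foldl_cons, h]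
      rw [hfm]; right
      rcases ih x with h2 | h2
      · rw [h2]; exact h
      · exact htrans _ _ _ h h2
    · have hfm : pvFm better a (x :: t) = pvFm better a t := by
        simp [pvFm, List.foldl_cons, h]
      rw [hfm]; exact ih a

-- the first element of A's filtered tie-list is exactly the running best
theorem pv_filter_head (better : Int → Int → Prop) [DecidableRel better]
    (htrans : ∀ u v w : Int, better v w → better u v → better u w)
    (hne : ∀ v w : Int, better v w → v ≠ w)
    (xs : List (String × Int)) (a : String × Int) :
    ((a :: xs).filter (fun q => q.2 == (pvFm better a xs).2)).head? = some (pvFm better a xs) := by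
  induction xs generalizing a with
  | nil => simp [pvFm]
  | cons x t ih =>
    by_cases h : better x.2 a.2
    · have hfm : pvFm better a (x :: t) = pvFm better x t := by
        simp [pvFm, List.foldl_cons, h]
      have hbeats : better (pvFm better x t).2 a.2 := by
        rcases pv_fm_dichot better htrans t x with h2 | h2
        · rw [h2]; exact h
        · exact htrans _ _ _ h h2
      have hna : a.2 ≠ (pvFm better x t).2 := fun he => hne _ _ hbeats he.symm
      rw [hfm, List.filter_cons_of_neg (by simp [hna])]
      exact ih x
    · have hfm : pvFm better a (x :: t) = pvFm better a t := by
        simp [pvFm, List.foldl_cons, h]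
      rcases pv_fm_dichot better htrans t a with h2 | h2
      · rw [hfm, h2, List.filter_cons_of_pos (by simp)]
        simp
      · have hna : a.2 ≠ (pvFm better a t).2 := fun he => hne _ _ h2 he.symm
        have hnx : x.2 ≠ (pvFm better a t).2 := fun he => h (he ▸ h2)
        have hih := ih a
        rw [List.filter_cons_of_neg (by simp [hna])] at hih
        rw [hfm, List.filter_cons_of_neg (by simp [hna]), List.filter_cons_of_neg (by simp [hnx])]
        exact hih

theorem pv_pyGet?_zero {α : Type} (bs : List α) : PySem.List.pyGet? bs 0 = bs.head? := by
  cases bs <;> simp [PySem.List.pyGet?, PySem.List.pyIdx?]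

-- head of a stable insertion-sort fold: each insertBy changes the head iff the new element
-- strictly "before"-beats the current head, so the head is the running best
theorem pv_foldl_insertBy_head (before : (String × Int) → (String × Int) → Bool)
    (xs : List (String × Int)) (h : String × Int) (t : List (String × Int)) :
    (xs.foldl (fun acc x => PySem.List.insertBy before x acc) (h :: t)).head?
      = some (xs.foldl (fun m x => if before x m then x else m) h) := by
  induction xs generalizing h t with
  | nil => rfl
  | cons x rest ih =>
    by_cases hb : before x h
    · simp only [List.foldl_cons, PySem.List.insertBy, hb, if_pos, ih]
    · simp only [List.foldl_cons, PySem.List.insertBy, hb, ih, if_false, Bool.false_eq_true]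

-- B's head of the stable sort is the running best (with the right strictness per direction)
theorem pv_sorted_head (rev : Bool) (xs : List (String × Int)) (a : String × Int) :
    (PySem.List.sorted (a :: xs) (fun s => s.2) rev).head?
      = some (pvFm (fun v w => if rev then w < v else v < w) a xs) := by
  cases rev with
  | false =>
    rw [PySem.List.sorted_eq_foldl_insertBy]
    have h0 : PySem.List.insertBy (fun p q : String × Int => decide (p.2 < q.2)) a [] = [a] := rfl
    rw [List.foldl_cons, h0, pv_foldl_insertBy_head]
    simp [pvFm]
  | true =>
    rw [PySem.List.sorted_rev_eq_foldl_insertBy]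
    have h0 : PySem.List.insertBy (fun p q : String × Int => decide (q.2 < p.2)) a [] = [a] := rfl
    rw [List.foldl_cons, h0, pv_foldl_insertBy_head]
    simp [pvFm]

theorem pv_trans_max : ∀ u v w : Int, w < v → v < u → w < u := by intro u v w h1 h2; omega
theorem pv_trans_min : ∀ u v w : Int, v < w → u < v → u < w := by intro u v w h1 h2; omega
theorem pv_ne_max : ∀ v w : Int, w < v → v ≠ w := by intro v w h; omega
theorem pv_ne_min : ∀ v w : Int, v < w → v ≠ w := by intro v w h; omega

-- ===== VERDICT (by name: the statement is the Claim_ definition above) =====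
theorem get_minimax_action_spec : Claim_equal_get_minimax_action := by
  intro agent action_scores _ hpre
  unfold Spec_get_minimax_action
  cases action_scores with
  | nil => exact absurd rfl hpre
  | cons a xs =>
    simp only [get_minimax_action, get_minimax_action_alt]
    by_cases hag : agent = 0
    · have hA := pv_filter_head (fun v w => w < v) pv_trans_max pv_ne_max xs a
      rw [if_pos hag, pv_max?_map_cons]
      dsimp only
      rw [pv_pyGet?_zero, hA, hag, pv_pyGet?_zero]
      simp only [decide_true] at *
      rw [show (PySem.List.sorted (a :: xs) (fun s => s.2) true).head?
            = some (pvFm (fun v w => w < v) a xs) from by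
          have := pv_sorted_head true xs a
          simpa using this]
      rfl
    · have hA := pv_filter_head (fun v w => v < w) pv_trans_min pv_ne_min xs a
      rw [if_neg hag, pv_min?_map_cons]
      dsimp only
      rw [pv_pyGet?_zero, hA, pv_pyGet?_zero]
      rw [show (PySem.List.sorted (a :: xs) (fun s => s.2) (decide (agent = 0))).head?
            = some (pvFm (fun v w => v < w) a xs) from by
          have := pv_sorted_head false xs a
          simp only [hag, decide_false]
          simpa using this]
      rfl
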